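-- pv_equiv track=rewrite | github.com/manonabiteboul/thesiscalculations | tensor_wedge.py | latexWithoutDollar
-- ===== SOURCE A (Python) =====
-- def latexWithoutDollar(a):
--     sol = ""
--     done = []
--     for x in a:
--         if x not in done:
--             if a.count(x)==1:
--                 sol = sol+str(x)+"/"
--             else:
--                 sol = sol+str(x)+"^"+str(a.count(x))+"/"
--             done.append(x)
--     sol = sol[:-1]+" "
--     #sol = sol[:-1]+" "
--     return(sol)
-- ===== SOURCE B (Python) =====
-- def latexWithoutDollar(a):
--     parts = []
--     rest = list(a)
--     while rest:
--         x = rest[0]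
--         nxt = [y for y in rest if y != x]
--         c = len(rest) - len(nxt)
--         parts.append(str(x) if c == 1 else str(x) + "^" + str(c))
--         rest = nxt
--     return "/".join(parts) + " "
-- ===== Notes on version B (the rewrite author's own statement) =====
-- stated objective: alternative
-- what changed: B repeatedly extracts the current first element together with all its duplicates (partition by != head, count = length difference) and shrinks the worklist, instead of A's scan with a 'done' membership list and repeated a.count passes over the full list.
import Mathlib
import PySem

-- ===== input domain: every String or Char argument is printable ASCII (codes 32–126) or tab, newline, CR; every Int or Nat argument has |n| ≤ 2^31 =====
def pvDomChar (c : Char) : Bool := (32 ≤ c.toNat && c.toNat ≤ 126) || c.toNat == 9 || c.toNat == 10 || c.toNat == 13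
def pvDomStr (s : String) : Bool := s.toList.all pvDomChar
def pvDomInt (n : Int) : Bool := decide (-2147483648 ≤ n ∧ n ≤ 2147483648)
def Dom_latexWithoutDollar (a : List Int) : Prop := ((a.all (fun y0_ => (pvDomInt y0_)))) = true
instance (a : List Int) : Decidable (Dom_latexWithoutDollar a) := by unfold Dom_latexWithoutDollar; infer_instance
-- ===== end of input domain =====

-- B repeatedly extracts the head element together with all its duplicates (partition by != head,
-- count = length difference) from a shrinking worklist — no 'done' list, no count over the full input.

-- ===== PORT A =====
def latexWithoutDollar (a : List Int) : String :=
  String.mk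
    (PySem.List.slice
      (a.foldl (fun (st : List Char × List Int) x =>
        if x ∈ st.2 then st
        else
          (if PySem.List.count a x == 1 then
             st.1 ++ PySem.Int.toChars x ++ ['/']
           else
             st.1 ++ PySem.Int.toChars x ++ ['^'] ++ PySem.Int.toChars (PySem.List.count a x : Int) ++ ['/'],
           st.2 ++ [x])) ([], [])).1
      none (some (-1)) ++ [' '])

-- ===== PORT B =====
-- the while loop: state is the remaining worklist; each round emits one part and
-- removes every occurrence of the current head
def pvAltParts : List Int → List (List Char)
  | [] => []
  | x :: t =>
    (if ((x :: t).length - (t.filter (fun y => !(y == x))).length) == 1 then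
       PySem.Int.toChars x
     else
       PySem.Int.toChars x ++ ['^'] ++
         PySem.Int.toChars ((((x :: t).length - (t.filter (fun y => !(y == x))).length : Nat)) : Int))
    :: pvAltParts (t.filter (fun y => !(y == x)))
termination_by a => a.length
decreasing_by
  have h := List.length_filter_le (fun (y : {y // y ∈ t}) => !((y : Int) == x)) t.attach
  simp only [List.length_attach] at h
  simp only [List.length_cons, List.unattach, List.length_map]
  exact Nat.lt_succ_of_le h

def latexWithoutDollar_alt (a : List Int) : String :=
  String.mk (PySem.Chars.join ['/'] (pvAltParts a) ++ [' '])

-- ===== PRECONDITION & SPEC =====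
def Spec_latexWithoutDollar (a : List Int) (out : String) : Prop := out = latexWithoutDollar_alt a
instance (a : List Int) (out : String) : Decidable (Spec_latexWithoutDollar a out) := by unfold Spec_latexWithoutDollar; infer_instance

-- ===== CLAIM (what is proved, stated in full; the proofs are below) =====
def Claim_equal_latexWithoutDollar : Prop := ∀ (a : List Int), Dom_latexWithoutDollar a → Spec_latexWithoutDollar a (latexWithoutDollar a)

-- ===== LEMMAS AND PROOFS =====

-- the formatted piece for one unique element, counts taken in `a`
def pvPart (a : List Int) (k : Int) : List Char :=
  if PySem.List.count a k == 1 then PySem.Int.toChars k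
  else PySem.Int.toChars k ++ ['^'] ++ PySem.Int.toChars (PySem.List.count a k : Int)

lemma pv_set_fold_prefix (l d : List Int) : d <+: l.foldl PySem.Set.add d := by
  induction l generalizing d with
  | nil => exact List.prefix_refl d
  | cons x xs ih =>
    simp only [List.foldl_cons]
    refine List.IsPrefix.trans ?_ (ih (PySem.Set.add d x))
    by_cases h : x ∈ d <;> simp [PySem.Set.add, h]

lemma pv_foldA_inv (a : List Int) (l : List Int) (sol : List Char) (done : List Int) :
    (l.foldl (fun (st : List Char × List Int) x =>
      if x ∈ st.2 then st
      else
        (if PySem.List.count a x == 1 then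
           st.1 ++ PySem.Int.toChars x ++ ['/']
         else
           st.1 ++ PySem.Int.toChars x ++ ['^'] ++ PySem.Int.toChars (PySem.List.count a x : Int) ++ ['/'],
         st.2 ++ [x])) (sol, done)).1
    = sol ++ ((l.foldl PySem.Set.add done).drop done.length).flatMap (fun k => pvPart a k ++ ['/']) := by
  induction l generalizing sol done with
  | nil => simp
  | cons x xs ih =>
    simp only [List.foldl_cons]
    by_cases h : x ∈ done
    · have hadd : PySem.Set.add done x = done := by simp [PySem.Set.add, h]
      simp only [h, if_pos trivial, hadd]
      simpa using ih sol done
    · have hadd : PySem.Set.add done x = done ++ [x] := by simp [PySem.Set.add, h]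
      obtain ⟨t, ht⟩ := pv_set_fold_prefix xs (done ++ [x])
      have hdrop1 : ((xs.foldl PySem.Set.add (done ++ [x])).drop done.length)
          = x :: ((xs.foldl PySem.Set.add (done ++ [x])).drop (done ++ [x]).length) := by
        have hlen : (done ++ [x]).length = done.length + 1 := by simp
        rw [← ht, hlen, List.append_assoc, List.drop_left, ← List.append_assoc,
            List.drop_left' hlen]
        simp
      by_cases hc : PySem.List.count a x == 1
      · simp only [h, if_false, hc, if_true, hadd]
        rw [ih, hdrop1]
        have hc' : PySem.List.count a x == 1 := hc
        simp [pvPart, PySem.List.count_eq] at hc' ⊢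
        simp [hc']
      · simp only [h, if_false, hc, hadd]
        rw [ih, hdrop1]
        have hc' : ¬ (List.count x a = 1) := by
          simpa [PySem.List.count_eq] using hc
        simp [pvPart, PySem.List.count_eq, hc']

lemma pv_dropLast_flatMap_slash (part : Int → List Char) (l : List Int) :
    (l.flatMap (fun k => part k ++ ['/'])).dropLast = PySem.Chars.join ['/'] (l.map part) := by
  induction l with
  | nil => simp [PySem.Chars.join, List.intercalate]
  | cons x xs ih =>
    cases xs with
    | nil => simp [PySem.Chars.join_singleton]
    | cons y t =>
      have hne : ((y :: t).flatMap (fun k => part k ++ ['/'])) ≠ [] := by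
        simp [List.flatMap_cons]
      rw [List.flatMap_cons, List.dropLast_append_of_ne_nil hne,
          List.map_cons, List.map_cons, PySem.Chars.join_cons_cons, ← List.map_cons, ih]

-- folding Set.add ignores later occurrences of an element already in the accumulator
lemma pv_fold_add_drop_mem (t : List Int) : ∀ (d : List Int) (x : Int), x ∈ d →
    t.foldl PySem.Set.add d = (t.filter (fun y => !(y == x))).foldl PySem.Set.add d := by
  induction t with
  | nil => intro d x _; rfl
  | cons z zs ih =>
    intro d x hx
    by_cases hzx : z = x
    · subst hzx
      have hadd : PySem.Set.add d z = d := by simp [PySem.Set.add, hx]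
      simp [hadd, ih d z hx]
    · have hmem : x ∈ PySem.Set.add d z := by
        by_cases h : z ∈ d <;> simp [PySem.Set.add, h, hx]
      rw [List.filter_cons, if_pos (by simp [hzx])]
      simp only [List.foldl_cons]
      exact ih (PySem.Set.add d z) x hmem
-- a fresh head stays in front of the fold
lemma pv_fold_add_fresh_head (l : List Int) : ∀ (d : List Int) (x : Int), (∀ y ∈ l, y ≠ x) →
    l.foldl PySem.Set.add (x :: d) = x :: l.foldl PySem.Set.add d := by
  induction l with
  | nil => intro d x _; rfl
  | cons z zs ih =>
    intro d x hl
    have hzx : z ≠ x := hl z (by simp)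
    have hrest : ∀ y ∈ zs, y ≠ x := fun y hy => hl y (by simp [hy])
    by_cases h : z ∈ d
    · have h1 : PySem.Set.add (x :: d) z = x :: d := by simp [PySem.Set.add, h]
      have h2 : PySem.Set.add d z = d := by simp [PySem.Set.add, h]
      simp only [List.foldl_cons, h1, h2]
      exact ih d x hrest
    · have h1 : PySem.Set.add (x :: d) z = x :: (d ++ [z]) := by
        simp [PySem.Set.add, h, hzx]
      have h2 : PySem.Set.add d z = d ++ [z] := by simp [PySem.Set.add, h]
      simp only [List.foldl_cons, h1, h2]
      exact ih (d ++ [z]) x hrest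

-- keep-first dedup splits at the head: ofList (x :: t) = x :: ofList (t with all x removed)
lemma pv_ofList_cons (x : Int) (t : List Int) :
    PySem.Set.ofList (x :: t) = x :: PySem.Set.ofList (t.filter (fun y => !(y == x))) := by
  have h0 : PySem.Set.ofList (x :: t) = t.foldl PySem.Set.add [x] := by
    simp [PySem.Set.ofList, PySem.Set.add]
  rw [h0, pv_fold_add_drop_mem t [x] x (by simp)]
  exact pv_fold_add_fresh_head _ [] x (by
    intro y hy
    have := List.of_mem_filter hy
    simpa using this)

lemma pv_len_split (x : Int) (t : List Int) :
    (t.filter (fun y => y == x)).length + (t.filter (fun y => !(y == x))).length = t.length := by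
  induction t with
  | nil => rfl
  | cons z zs ihz =>
    by_cases hz : z = x <;> simp [hz] <;> omega

-- count of the head = how much filtering it away shrinks the list
lemma pv_count_head (x : Int) (t : List Int) :
    List.count x (x :: t) = (x :: t).length - (t.filter (fun y => !(y == x))).length := by
  have h1 : List.count x t = (t.filter (fun y => y == x)).length := by
    simp [List.count_eq_length_filter]
  have h2 := pv_len_split x t
  have h3 : (t.filter (fun y => !(y == x))).length ≤ t.length := List.length_filter_le _ t
  simp only [List.count_cons_self, List.length_cons, h1]
  omega

-- counts of surviving elements are unchanged by removing x
lemma pv_count_filter_ne (x k : Int) (t : List Int) (hk : k ≠ x) :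
    List.count k (t.filter (fun y => !(y == x))) = List.count k (x :: t) := by
  rw [List.count_filter (by simp [hk])]
  simp [Ne.symm hk]

lemma pv_altParts_eq (a : List Int) :
    pvAltParts a = (PySem.Set.ofList a).map (pvPart a) := by
  fun_induction pvAltParts a with
  | case1 => rfl
  | case2 x t ih =>
    rw [pv_ofList_cons, List.map_cons]
    simp only [List.unattach_filter, List.unattach_attach] at ih
    simp only [List.cons.injEq]
    refine ⟨?_, ?_⟩
    · -- the emitted part equals pvPart (x::t) x
      have hc := pv_count_head x t
      simp only [pvPart, PySem.List.count_eq, ← hc]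
    · rw [ih]
      apply List.map_congr_left
      intro k hk
      have hkmem : k ∈ t.filter (fun y => !(y == x)) := (PySem.Set.mem_ofList _ _).mp hk
      have hkx : k ≠ x := by simpa using List.of_mem_filter hkmem
      simp only [pvPart, PySem.List.count_eq, pv_count_filter_ne x k t hkx]

-- ===== VERDICT (by name: the statement is the Claim_ definition above) =====
theorem latexWithoutDollar_spec : Claim_equal_latexWithoutDollar := by
  intro a _
  show latexWithoutDollar a = latexWithoutDollar_alt a
  unfold latexWithoutDollar latexWithoutDollar_alt
  rw [pv_foldA_inv a a [] [], PySem.List.slice_to_neg_one, pv_altParts_eq]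
  have hof : a.foldl PySem.Set.add [] = PySem.Set.ofList a := rfl
  rw [hof]
  simp only [List.length_nil, List.drop_zero, List.nil_append]
  rw [pv_dropLast_flatMap_slash (pvPart a) (PySem.Set.ofList a)]
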